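-- pv_equiv track=rewrite | github.com/silam741852963/web2product-catalog | scripts/extensions/run_utils.py | parse_pipeline
-- ===== SOURCE A (Python) =====
-- from typing import Any, Callable, Dict, Iterable, List, Optional, Sequence, Tuple
--
-- def parse_pipeline(pipeline_arg: str) -> List[str]:
--     stages = [s.strip().lower() for s in (pipeline_arg or "").split(",") if s.strip()]
--     allowed = {
--         ("seed",), ("markdown",), ("llm",),
--         ("seed", "markdown"), ("markdown", "llm"),
--         ("seed", "llm"), ("seed", "markdown", "llm"),
--     }
--     if tuple(stages) not in allowed:
--         raise SystemExit(
--             f"Invalid --pipeline '{pipeline_arg}'. Use combinations of: seed, markdown, llm"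
--         )
--     return stages
-- ===== SOURCE B (Python) =====
-- def parse_pipeline(pipeline_arg: str):
--     stages = [s.strip().lower() for s in (pipeline_arg or "").split(",") if s.strip()]
--     rank = {"seed": 0, "markdown": 1, "llm": 2}
--     ok = bool(stages) and all(s in rank for s in stages)
--     ok = ok and all(rank[a] < rank[b] for a, b in zip(stages, stages[1:]))
--     if not ok:
--         raise SystemExit(
--             f"Invalid --pipeline '{pipeline_arg}'. Use combinations of: seed, markdown, llm"
--         )
--     return stages
-- ===== Notes on version B (the rewrite author's own statement) =====
-- stated objective: simpler
-- what changed: Replaces the enumerated set of 7 allowed stage tuples with a rank map and a structural check (non-empty, all known, ranks strictly increasing).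
import Mathlib
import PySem

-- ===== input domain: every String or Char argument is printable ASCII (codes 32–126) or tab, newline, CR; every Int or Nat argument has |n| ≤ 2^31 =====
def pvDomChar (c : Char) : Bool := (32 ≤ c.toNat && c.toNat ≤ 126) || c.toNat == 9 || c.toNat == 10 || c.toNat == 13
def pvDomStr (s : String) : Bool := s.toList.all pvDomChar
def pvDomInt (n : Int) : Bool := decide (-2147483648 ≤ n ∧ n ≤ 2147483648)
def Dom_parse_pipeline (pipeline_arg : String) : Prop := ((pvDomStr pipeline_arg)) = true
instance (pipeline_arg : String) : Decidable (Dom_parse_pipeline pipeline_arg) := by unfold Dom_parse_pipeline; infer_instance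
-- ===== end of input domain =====

-- B replaces A's enumerated set of 7 allowed stage tuples with a rank map and a structural
-- strictly-increasing check (objective: simpler). Both raise SystemExit on invalid input;
-- those inputs are outside Pre_.

-- shared normalization: [s.strip().lower() for s in (pipeline_arg or "").split(",") if s.strip()]
def pvStages (pipeline_arg : String) : List String :=
  -- s.split(",") with a non-empty separator: split? is some here, getD [] never fires
  (((PySem.Str.split? pipeline_arg ",").getD []).filter
      (fun t => PySem.Str.strip t ≠ "")).map (fun t => PySem.Str.lower (PySem.Str.strip t))

-- ===== PORT A =====
-- A's `allowed` set of tuples, as the list of its distinct elements; `tuple(stages) not in allowed`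
-- is the membership test below.  Where Python raises SystemExit the port returns [] (excluded by Pre_).
def pvAllowed : List (List String) :=
  [["seed"], ["markdown"], ["llm"],
   ["seed", "markdown"], ["markdown", "llm"],
   ["seed", "llm"], ["seed", "markdown", "llm"]]

def parse_pipeline (pipeline_arg : String) : List String :=
  let stages := pvStages pipeline_arg
  if pvAllowed.contains stages then stages else []

-- ===== PORT B =====
def pvRank : PySem.Dict String Int :=
  PySem.Dict.ofList [("seed", 0), ("markdown", 1), ("llm", 2)]

-- B's structural validity: non-empty, every stage known, adjacent ranks strictly increasing
def pvOkB (stages : List String) : Bool :=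
  (!stages.isEmpty && stages.all (fun s => PySem.Dict.contains pvRank s))
    && (stages.zip stages.tail).all
        (fun p => PySem.Dict.getD pvRank p.1 0 < PySem.Dict.getD pvRank p.2 0)

def parse_pipeline_alt (pipeline_arg : String) : List String :=
  let stages := pvStages pipeline_arg
  if pvOkB stages then stages else []

-- ===== PRECONDITION & SPEC =====
-- Pre_ excludes exactly the inputs on which A raises SystemExit (normalized stage list not one
-- of the 7 allowed combinations).
def Pre_parse_pipeline (pipeline_arg : String) : Prop :=
  pvStages pipeline_arg ∈ pvAllowed
instance (pipeline_arg : String) : Decidable (Pre_parse_pipeline pipeline_arg) := by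
  unfold Pre_parse_pipeline; infer_instance

def pvWitness_parse_pipeline : String := "seed, Markdown ,LLM"

def Spec_parse_pipeline (pipeline_arg : String) (out : List String) : Prop := out = parse_pipeline_alt pipeline_arg
instance (pipeline_arg : String) (out : List String) : Decidable (Spec_parse_pipeline pipeline_arg out) := by unfold Spec_parse_pipeline; infer_instance

-- ===== CLAIM (what is proved, stated in full; the proofs are below) =====
def Claim_equal_parse_pipeline : Prop := ∀ (pipeline_arg : String), Dom_parse_pipeline pipeline_arg → Pre_parse_pipeline pipeline_arg → Spec_parse_pipeline pipeline_arg (parse_pipeline pipeline_arg)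

-- ===== LEMMAS AND PROOFS =====

-- each of the 7 allowed lists passes B's structural check
theorem pvOkB_of_allowed (l : List String) (h : l ∈ pvAllowed) : pvOkB l = true := by
  fin_cases h <;> decide

-- ===== VERDICT (by name: the statement is the Claim_ definition above) =====
theorem parse_pipeline_spec : Claim_equal_parse_pipeline := by
  intro s _ hpre
  have hm : pvStages s ∈ pvAllowed := hpre
  unfold Spec_parse_pipeline parse_pipeline parse_pipeline_alt
  simp [hm, pvOkB_of_allowed _ hm]
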